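-- pv_equiv track=rewrite | github.com/neimasilk/nusantara-agent | scripts/audit_gold_vs_votes.py | calculate_derived_label
-- ===== SOURCE A (Python) =====
-- from collections import Counter
--
-- def calculate_derived_label(votes):
--     # Filter out empty votes
--     valid_votes = [v for v in votes.values() if v and v != "N/A"]
--
--     if not valid_votes:
--         return "NO_VOTES", "NO_VOTES"
--
--     counts = Counter(valid_votes)
--     most_common = counts.most_common(2)
--
--     top_label, top_count = most_common[0]
--     total_votes = len(valid_votes)
--
--     # Check for tie
--     if len(most_common) > 1 and most_common[1][1] == top_count:
--         return "SPLIT", "TIE"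
--
--     status = "MAJORITY"
--     if top_count == total_votes:
--         status = "UNANIMOUS"
--
--     return top_label, status
-- ===== SOURCE B (Python) =====
-- def calculate_derived_label(votes):
--     # Filter out empty votes
--     valid = [v for v in votes.values() if v and v != "N/A"]
--
--     if not valid:
--         return "NO_VOTES", "NO_VOTES"
--
--     # Sort-then-scan: sorting groups equal labels into contiguous runs,
--     # so no counting dict is needed at all.  One scan over the runs tracks
--     # the longest run, its label, and how many runs tie at that length.
--     s = sorted(valid)
--     n = len(s)
--     best_label, best, ties = "", 0, 0
--     i = 0
--     while i < n:
--         j = i + 1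
--         while j < n and s[j] == s[i]:
--             j += 1
--         c = j - i          # length of the run s[i:j]
--         if c > best:
--             best_label, best, ties = s[i], c, 1
--         elif c == best:
--             ties += 1
--         i = j
--
--     if ties >= 2:
--         return "SPLIT", "TIE"
--     return best_label, "UNANIMOUS" if best == n else "MAJORITY"
-- ===== Notes on version B (the rewrite author's own statement) =====
-- stated objective: alternative
-- what changed: Replaces Counter + most_common(2) entirely by sort-then-scan: the valid votes are sorted so equal labels become contiguous runs, and one scan over the runs tracks the longest run, its label and how many runs tie at that length; no counting dict or frequency selection exists in B. Correct because the label is only returned when the maximum is unique, so Counter's tie-break order never matters.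
import Mathlib
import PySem

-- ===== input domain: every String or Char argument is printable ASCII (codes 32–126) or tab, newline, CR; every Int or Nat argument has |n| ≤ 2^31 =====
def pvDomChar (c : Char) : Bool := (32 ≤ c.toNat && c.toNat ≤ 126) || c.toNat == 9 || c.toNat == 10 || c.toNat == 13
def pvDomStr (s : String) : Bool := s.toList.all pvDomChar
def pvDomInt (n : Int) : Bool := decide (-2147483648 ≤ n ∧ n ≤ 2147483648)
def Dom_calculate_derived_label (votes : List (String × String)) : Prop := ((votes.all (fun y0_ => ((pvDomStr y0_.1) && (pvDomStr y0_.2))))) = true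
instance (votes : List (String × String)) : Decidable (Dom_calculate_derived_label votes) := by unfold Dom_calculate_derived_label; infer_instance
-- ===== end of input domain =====

-- B replaces Counter + most_common(2) by sort-then-scan: the valid votes are sorted so equal
-- labels form contiguous runs, and one scan over the runs finds the longest run, its label,
-- and how many runs tie at that length; no counting dict exists in B.

-- ===== PORT A =====
-- valid_votes = [v for v in votes.values() if v and v != "N/A"]
def pvValid (votes : List (String × String)) : List String :=
  ((PySem.Dict.ofList votes).values).filter (fun v => !(v == "") && !(v == "N/A"))

def calculate_derived_label (votes : List (String × String)) : String × String :=
  let valid_votes := pvValid votes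
  if valid_votes = [] then ("NO_VOTES", "NO_VOTES")
  else
    let counts := PySem.Dict.counter valid_votes
    -- counts.most_common(2) = heapq.nlargest(2, items, key=snd) = stable descending sort, first two
    let most_common := (PySem.List.sorted counts.items (fun p => p.2) true).take 2
    match most_common with
    | [] => ("NO_VOTES", "NO_VOTES")  -- unreachable: valid_votes ≠ []
    | (top_label, top_count) :: rest =>
      let total_votes : Int := valid_votes.length
      if (match rest with | [] => false | q :: _ => q.2 == top_count) then ("SPLIT", "TIE")
      else (top_label, if top_count == total_votes then "UNANIMOUS" else "MAJORITY")

-- ===== PORT B =====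
-- the best/ties update performed once per run (the if/elif in Source B's outer loop body)
def pvScanStep (acc : String × Int × Int) (p : String × Int) : String × Int × Int :=
  if acc.2.1 < p.2 then (p.1, p.2, 1)
  else if p.2 = acc.2.1 then (acc.1, acc.2.1, acc.2.2 + 1)
  else acc

-- Source B's outer while loop over the sorted list; the inner index loop 'while j < n and s[j] == s[i]'
-- that delimits the run s[i:j] is ported exactly as takeWhile/dropWhile on the remaining suffix
def pvRunScan : List String → String × Int × Int → String × Int × Int
  | [], acc => acc
  | v :: t, acc =>
      pvRunScan (t.dropWhile (fun x => x == v))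
        (pvScanStep acc (v, 1 + (t.takeWhile (fun x => x == v)).length))
termination_by l _ => l.length
decreasing_by
  simp only [List.length_cons]
  exact Nat.lt_succ_of_le (List.length_dropWhile_le _ _)

def calculate_derived_label_alt (votes : List (String × String)) : String × String :=
  let valid := ((PySem.Dict.ofList votes).values).filter (fun v => !(v == "") && !(v == "N/A"))
  if valid = [] then ("NO_VOTES", "NO_VOTES")
  else
    let s := PySem.List.sorted valid (fun v => v) false
    let r := pvRunScan s ("", 0, 0)
    if 2 ≤ r.2.2 then ("SPLIT", "TIE")
    else (r.1, if r.2.1 == (s.length : Int) then "UNANIMOUS" else "MAJORITY")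

-- ===== PRECONDITION & SPEC =====
def Spec_calculate_derived_label (votes : List (String × String)) (out : String × String) : Prop := out = calculate_derived_label_alt votes
instance (votes : List (String × String)) (out : String × String) : Decidable (Spec_calculate_derived_label votes out) := by unfold Spec_calculate_derived_label; infer_instance

-- ===== CLAIM (what is proved, stated in full; the proofs are below) =====
def Claim_equal_calculate_derived_label : Prop := ∀ (votes : List (String × String)), Dom_calculate_derived_label votes → Spec_calculate_derived_label votes (calculate_derived_label votes)

-- ===== LEMMAS AND PROOFS =====

-- the final decision both programs take from (label, max, ties) and the total
def pvDecide (r : String × Int × Int) (n : Int) : String × String :=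
  if 2 ≤ r.2.2 then ("SPLIT", "TIE")
  else (r.1, if r.2.1 == n then "UNANIMOUS" else "MAJORITY")

-- run pairs (label, run length) of a list, in order  (pvRunScan = fold of pvScanStep over them)
def pvRunPairs : List String → List (String × Int)
  | [] => []
  | v :: t => (v, 1 + (t.takeWhile (fun x => x == v)).length) :: pvRunPairs (t.dropWhile (fun x => x == v))
termination_by l => l.length
decreasing_by
  simp only [List.length_cons]
  exact Nat.lt_succ_of_le (List.length_dropWhile_le _ _)

theorem runScan_eq_fold (l : List String) : ∀ acc, pvRunScan l acc = (pvRunPairs l).foldl pvScanStep acc := by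
  induction l using pvRunPairs.induct with
  | case1 => intro acc; simp [pvRunScan, pvRunPairs]
  | case2 v t ih =>
      intro acc
      rw [pvRunScan, pvRunPairs, List.foldl_cons, ih]

-- ===== generic scan lemmas =====

theorem scan_max (l : List (String × Int)) : ∀ (a : String × Int × Int),
    (l.foldl pvScanStep a).2.1 = l.foldl (fun m q => max m q.2) a.2.1 := by
  induction l with
  | nil => intro a; rfl
  | cons p t ih =>
    intro a
    simp only [List.foldl_cons, pvScanStep]
    split_ifs with h1 h2
    · simpa [max_eq_right (le_of_lt h1)] using ih _
    · simpa [h2, max_self] using ih _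
    · have : max a.2.1 p.2 = a.2.1 := max_eq_left (by omega)
      simpa [this] using ih _

theorem le_foldl_max (l : List (String × Int)) : ∀ (m : Int), m ≤ l.foldl (fun m q => max m q.2) m := by
  induction l with
  | nil => intro m; simp
  | cons p t ih => intro m; exact le_trans (le_max_left _ _) (ih _)

theorem mem_le_foldl_max (l : List (String × Int)) : ∀ (m : Int) (q : String × Int), q ∈ l → q.2 ≤ l.foldl (fun m q => max m q.2) m := by
  induction l with
  | nil => intro _ _ h; cases h
  | cons p t ih =>
    intro m q hq
    rcases List.mem_cons.1 hq with rfl | hq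
    · exact le_trans (le_max_right _ _) (le_foldl_max t _)
    · exact ih _ _ hq

-- scan over a list all of whose counts are ≤ the running max: nothing but the tie counter moves
theorem scan_low (l : List (String × Int)) : ∀ (lab : String) (m k : Int),
    (∀ q ∈ l, q.2 ≤ m) →
    l.foldl pvScanStep (lab, m, k) = (lab, m, k + l.countP (fun q => q.2 = m)) := by
  induction l with
  | nil => intro lab m k _; simp
  | cons p t ih =>
    intro lab m k h
    have hp : p.2 ≤ m := h p (List.mem_cons_self ..)
    have ht : ∀ q ∈ t, q.2 ≤ m := fun q hq => h q (List.mem_cons_of_mem _ hq)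
    simp only [List.foldl_cons, pvScanStep]
    split_ifs with h1 h2
    · omega
    · rw [ih _ _ _ ht]
      simp [h2]
      omega
    · rw [ih _ _ _ ht]
      have : ¬ (p.2 = m) := by omega
      simp [this]

-- scan when some element strictly beats the running max: the result's max is the true max,
-- its label belongs to an element achieving it, and the tie counter counts the maximizers
theorem scan_hi (l : List (String × Int)) : ∀ (lab : String) (m k : Int),
    (∃ q ∈ l, m < q.2) →
    let r := l.foldl pvScanStep (lab, m, k)
    ∃ w ∈ l, w.2 = r.2.1 ∧ r.1 = w.1 ∧ r.2.2 = l.countP (fun q => q.2 = r.2.1) := by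
  induction l with
  | nil => intro _ _ _ h; rcases h with ⟨q, hq, _⟩; cases hq
  | cons p t ih =>
    intro lab m k hex
    simp only [List.foldl_cons]
    by_cases h1 : m < p.2
    · simp only [pvScanStep, if_pos h1]
      by_cases h2 : ∃ q ∈ t, p.2 < q.2
      · rcases ih p.1 p.2 1 h2 with ⟨w, hw, hw2, hw1, hwk⟩
        refine ⟨w, List.mem_cons_of_mem _ hw, hw2, hw1, ?_⟩
        rcases h2 with ⟨q, hq, hqlt⟩
        have hRbig : p.2 < (t.foldl pvScanStep (p.1, p.2, 1)).2.1 := by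
          rw [scan_max]
          exact lt_of_lt_of_le hqlt (mem_le_foldl_max t _ q hq)
        have : ¬ (p.2 = (t.foldl pvScanStep (p.1, p.2, 1)).2.1) := by omega
        simp [this, hwk]
      · push Not at h2
        rw [scan_low t p.1 p.2 1 (fun q hq => h2 q hq)]
        refine ⟨p, List.mem_cons_self .., rfl, rfl, ?_⟩
        simp
        omega
    · have hex' : ∃ q ∈ t, m < q.2 := by
        rcases hex with ⟨q, hq, hqm⟩
        rcases List.mem_cons.1 hq with rfl | hq'
        · omega
        · exact ⟨q, hq', hqm⟩
      have hcnt : ∀ lab' k', ∃ w ∈ p :: t,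
          w.2 = (t.foldl pvScanStep (lab', m, k')).2.1 ∧
          (t.foldl pvScanStep (lab', m, k')).1 = w.1 ∧
          (t.foldl pvScanStep (lab', m, k')).2.2 = (p :: t).countP (fun q => q.2 = (t.foldl pvScanStep (lab', m, k')).2.1) := by
        intro lab' k'
        rcases ih lab' m k' hex' with ⟨w, hw, hw2, hw1, hwk⟩
        have hRbig : m < (t.foldl pvScanStep (lab', m, k')).2.1 := by
          rcases hex' with ⟨q, hq, hqm⟩
          rw [scan_max]
          exact lt_of_lt_of_le hqm (mem_le_foldl_max t _ q hq)
        have hne : ¬ (p.2 = (t.foldl pvScanStep (lab', m, k')).2.1) := by omega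
        exact ⟨w, List.mem_cons_of_mem _ hw, hw2, hw1, by simp [hne, hwk]⟩
      simp only [pvScanStep, if_neg h1]
      split_ifs with h2
      · exact hcnt lab (k + 1)
      · exact hcnt lab k

-- from countP = 1, the satisfying member is unique
theorem countP_one_unique {α : Type} {l : List α} {p : α → Bool} (h : l.countP p = 1)
    {x y : α} (hx : x ∈ l) (hpx : p x) (hy : y ∈ l) (hpy : p y) : x = y := by
  have hf : (l.filter p).length = 1 := by
    simpa [List.countP_eq_length_filter] using h
  rcases List.length_eq_one_iff.1 hf with ⟨z, hz⟩
  have hx' : x ∈ l.filter p := List.mem_filter.2 ⟨hx, hpx⟩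
  have hy' : y ∈ l.filter p := List.mem_filter.2 ⟨hy, hpy⟩
  rw [hz] at hx' hy'
  simp at hx' hy'
  rw [hx', hy']

-- the decision after the scan is invariant under permutation of the (label, count) pairs
theorem decide_perm (l₁ l₂ : List (String × Int)) (hp : l₁.Perm l₂)
    (hpos : ∃ q ∈ l₁, (0:Int) < q.2) (n : Int) :
    pvDecide (l₁.foldl pvScanStep ("", 0, 0)) n = pvDecide (l₂.foldl pvScanStep ("", 0, 0)) n := by
  obtain ⟨w₁, hw₁, hw₁2, hw₁1, hw₁k⟩ := scan_hi l₁ "" 0 0 hpos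
  obtain ⟨w₂, hw₂, hw₂2, hw₂1, hw₂k⟩ := scan_hi l₂ "" 0 0 (by
    rcases hpos with ⟨q, hq, hq2⟩; exact ⟨q, hp.mem_iff.1 hq, hq2⟩)
  set r₁ := l₁.foldl pvScanStep ("", 0, 0) with hr₁
  set r₂ := l₂.foldl pvScanStep ("", 0, 0) with hr₂
  have hm₁ : r₁.2.1 = l₁.foldl (fun m q => max m q.2) 0 := by
    rw [hr₁]; simpa using scan_max l₁ ("", 0, 0)
  have hm₂ : r₂.2.1 = l₂.foldl (fun m q => max m q.2) 0 := by
    rw [hr₂]; simpa using scan_max l₂ ("", 0, 0)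
  have hM : r₁.2.1 = r₂.2.1 := by
    apply le_antisymm
    · have h := mem_le_foldl_max l₂ 0 w₁ (hp.mem_iff.1 hw₁)
      omega
    · have h := mem_le_foldl_max l₁ 0 w₂ (hp.mem_iff.2 hw₂)
      omega
  have hK : r₁.2.2 = r₂.2.2 := by
    rw [hw₁k, hw₂k, ← hM, hp.countP_eq]
  have hL : ¬ (2 ≤ r₂.2.2) → r₁.1 = r₂.1 := by
    intro h2
    have hk1 : l₁.countP (fun q => q.2 = r₁.2.1) = 1 := by
      have hge : 1 ≤ l₁.countP (fun q => decide (q.2 = r₁.2.1)) := by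
        rw [List.countP_eq_length_filter]
        have : w₁ ∈ l₁.filter (fun q => decide (q.2 = r₁.2.1)) :=
          List.mem_filter.2 ⟨hw₁, by simp [hw₁2]⟩
        exact List.length_pos_of_mem this
      omega
    have hw12 : w₁ = w₂ :=
      countP_one_unique (l := l₁) (p := fun q => decide (q.2 = r₁.2.1)) hk1 hw₁
        (by simp [hw₁2]) (hp.mem_iff.2 hw₂) (by simp [hw₂2, hM])
    rw [hw₁1, hw₂1, hw12]
  unfold pvDecide
  rw [hM, hK]
  by_cases h2 : 2 ≤ r₂.2.2
  · simp [h2]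
  · simp [h2, hL h2]

-- ===== run decomposition of a sorted list =====

-- head-run facts of a ≤-sorted nonempty list: the run is exactly the occurrences of its label
theorem run_head_facts (v : String) (t : List String) (hs : (v :: t).Pairwise (· ≤ ·)) :
    (t.dropWhile (fun x => x == v)).Pairwise (· ≤ ·) ∧
    v ∉ t.dropWhile (fun x => x == v) ∧
    (v :: t).count v = 1 + (t.takeWhile (fun x => x == v)).length ∧
    (∀ x : String, x ≠ v → (v :: t).count x = (t.dropWhile (fun x => x == v)).count x) ∧
    (∀ x : String, x ∈ v :: t ↔ x = v ∨ x ∈ t.dropWhile (fun x => x == v)) := by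
  have htw : ∀ x ∈ t.takeWhile (fun x => x == v), x = v := by
    intro x hx
    have := List.mem_takeWhile_imp hx
    simpa using this
  have hsplit : t = t.takeWhile (fun x => x == v) ++ t.dropWhile (fun x => x == v) :=
    (List.takeWhile_append_dropWhile (p := fun x => x == v) (l := t)).symm
  have hle : ∀ x ∈ t, v ≤ x := fun x hx => (List.pairwise_cons.1 hs).1 x hx
  have hdr_sorted : (t.dropWhile (fun x => x == v)).Pairwise (· ≤ ·) :=
    List.Pairwise.sublist (List.dropWhile_sublist _) (List.pairwise_cons.1 hs).2
  have hvnotdr : v ∉ t.dropWhile (fun x => x == v) := by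
    intro hvd
    cases hd : t.dropWhile (fun x => x == v) with
    | nil => rw [hd] at hvd; cases hvd
    | cons h0 d =>
      have hh0 : ¬ (h0 == v) = true := by
        have := List.head?_dropWhile_not (fun x => x == v) t
        rw [hd] at this
        simpa using this
      have hh0v : h0 ≠ v := by simpa using hh0
      rw [hd] at hvd
      rcases List.mem_cons.1 hvd with rfl | hvd'
      · exact hh0v rfl
      · have h1 : h0 ≤ v := by
          rw [hd] at hdr_sorted
          exact (List.pairwise_cons.1 hdr_sorted).1 v hvd'
        have h2 : v ≤ h0 := hle h0 (by rw [hsplit, hd]; exact List.mem_append_right _ (List.mem_cons_self ..))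
        exact hh0v (le_antisymm h1 h2)
  have hcount_tw : (t.takeWhile (fun x => x == v)).count v = (t.takeWhile (fun x => x == v)).length :=
    List.count_eq_length.2 (fun x hx => ((htw x hx) ▸ rfl))
  have hcv : (v :: t).count v = 1 + (t.takeWhile (fun x => x == v)).length := by
    rw [List.count_cons_self]
    have ht : t.count v = (t.takeWhile (fun x => x == v)).length := by
      conv_lhs => rw [hsplit]
      rw [List.count_append, hcount_tw, List.count_eq_zero.2 hvnotdr]
      omega
    omega
  refine ⟨hdr_sorted, hvnotdr, hcv, ?_, ?_⟩
  · intro x hxv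
    have h0 : (v :: t).count x = t.count x := by
      simp [Ne.symm hxv]
    rw [h0]
    conv_lhs => rw [hsplit]
    rw [List.count_append, List.count_eq_zero.2 (fun hx => hxv (htw x hx))]
    omega
  · intro x
    constructor
    · intro hx
      rcases List.mem_cons.1 hx with rfl | hx'
      · exact Or.inl rfl
      · rw [hsplit] at hx'
        rcases List.mem_append.1 hx' with h | h
        · exact Or.inl (htw x h)
        · exact Or.inr h
    · rintro (rfl | hx)
      · exact List.mem_cons_self ..
      · exact List.mem_cons_of_mem _ (by rw [hsplit]; exact List.mem_append_right _ hx)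

-- membership in the run pairs of a ≤-sorted list: exactly the labels with their counts
theorem runPairs_mem (l : List String) (hs : l.Pairwise (· ≤ ·)) :
    ∀ p : String × Int, p ∈ pvRunPairs l ↔ p.1 ∈ l ∧ p.2 = (l.count p.1 : Int) := by
  induction l using pvRunPairs.induct with
  | case1 => intro p; simp [pvRunPairs]
  | case2 v t ih =>
      intro p
      obtain ⟨hdr_sorted, hvnotdr, hcv, hcother, hmem⟩ := run_head_facts v t hs
      rw [pvRunPairs]
      constructor
      · intro hp
        rcases List.mem_cons.1 hp with rfl | hp'
        · refine ⟨List.mem_cons_self .., ?_⟩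
          simp only []
          rw [hcv]; push_cast; ring
        · obtain ⟨hm, hc⟩ := (ih hdr_sorted p).1 hp'
          have hpv : p.1 ≠ v := fun h => hvnotdr (h ▸ hm)
          exact ⟨(hmem p.1).2 (Or.inr hm), by rw [hcother p.1 hpv]; exact hc⟩
      · rintro ⟨hm, hc⟩
        by_cases hpv : p.1 = v
        · apply List.mem_cons.2
          left
          have hsnd : p.2 = 1 + ((t.takeWhile (fun x => x == v)).length : Int) := by
            rw [hc, hpv, hcv]; push_cast; ring
          calc p = (p.1, p.2) := rfl
            _ = (v, 1 + ((t.takeWhile (fun x => x == v)).length : Int)) := by rw [hpv, hsnd]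
        · apply List.mem_cons.2
          right
          apply (ih hdr_sorted p).2
          have hmd : p.1 ∈ t.dropWhile (fun x => x == v) := by
            rcases (hmem p.1).1 hm with h | h
            · exact absurd h hpv
            · exact h
          exact ⟨hmd, by rw [hc, hcother p.1 hpv]⟩

-- the run pairs of a ≤-sorted list are Nodup (their labels are distinct)
theorem runPairs_nodup (l : List String) (hs : l.Pairwise (· ≤ ·)) : (pvRunPairs l).Nodup := by
  induction l using pvRunPairs.induct with
  | case1 => simp [pvRunPairs]
  | case2 v t ih =>
      obtain ⟨hdr_sorted, hvnotdr, _, _, _⟩ := run_head_facts v t hs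
      rw [pvRunPairs]
      refine List.nodup_cons.2 ⟨?_, ih hdr_sorted⟩
      intro hmemp
      exact hvnotdr ((runPairs_mem _ hdr_sorted _).1 hmemp).1

-- ===== PROOF OF THE CLAIM =====

theorem AB_eq (votes : List (String × String)) :
    calculate_derived_label votes = calculate_derived_label_alt votes := by
  unfold calculate_derived_label calculate_derived_label_alt
  have hv : List.filter (fun v => !(v == "") && !(v == "N/A")) (PySem.Dict.ofList votes).values = pvValid votes := rfl
  simp only [hv]
  by_cases hE : pvValid votes = []
  · simp [hE]
  · simp only [if_neg hE]
    set V := pvValid votes with hV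
    set items := (PySem.Dict.counter V).items with hitems
    set S := PySem.List.sorted V (fun v => v) false with hS
    obtain ⟨v0, t0, hv0⟩ : ∃ v0 t0, V = v0 :: t0 := by
      cases h : V with
      | nil => exact absurd h hE
      | cons a b => exact ⟨a, b, rfl⟩
    have hpos : ∃ q ∈ items, (0:Int) < q.2 := by
      refine ⟨(v0, (V.count v0 : Int)), ?_, ?_⟩
      · rw [hitems, PySem.Dict.items_counter]
        exact List.mem_map_of_mem (by simp [hv0])
      · simp only []
        have : 0 < V.count v0 := List.count_pos_iff.2 (by simp [hv0])
        exact_mod_cast this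
    -- step 1: A's most_common(2) decision equals pvDecide of the scan over items
    have hA : (match (PySem.List.sorted items (fun p => p.2) true).take 2 with
        | [] => (("NO_VOTES", "NO_VOTES") : String × String)
        | (top_label, top_count) :: rest =>
          if (match rest with | [] => false | q :: _ => q.2 == top_count) then ("SPLIT", "TIE")
          else (top_label, if top_count == (V.length : Int) then "UNANIMOUS" else "MAJORITY"))
        = pvDecide (items.foldl pvScanStep ("", 0, 0)) (V.length : Int) := by
      obtain ⟨a, rest, hs⟩ : ∃ a rest,
          PySem.List.sorted items (fun p => p.2) true = a :: rest := by
        cases h : PySem.List.sorted items (fun p => p.2) true with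
        | nil =>
          rw [PySem.List.sorted_eq_nil_iff] at h
          rcases hpos with ⟨q, hq, _⟩
          rw [h] at hq
          cases hq
        | cons a rest => exact ⟨a, rest, rfl⟩
      have hub : ∀ y ∈ items, y.2 ≤ a.2 := PySem.List.key_head_sorted_rev_ge items (fun p => p.2) hs
      have hamem : a ∈ items := by
        have : a ∈ PySem.List.sorted items (fun p => p.2) true := by
          rw [hs]; exact List.mem_cons_self ..
        exact (PySem.List.mem_sorted items (fun p => p.2) true a).1 this
      have hperm : (PySem.List.sorted items (fun p => p.2) true).Perm items :=
        PySem.List.sorted_perm items (fun p => p.2) true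
      obtain ⟨w, hwmem, hw2, hw1, hwk⟩ := scan_hi items "" 0 0 hpos
      set r := items.foldl pvScanStep ("", 0, 0) with hr
      have hR : r.2.1 = a.2 := by
        refine le_antisymm (hw2 ▸ hub w hwmem) ?_
        rw [hr, scan_max]
        exact mem_le_foldl_max items 0 a hamem
      have hcnt : items.countP (fun q => q.2 = a.2) = (a :: rest).countP (fun q => q.2 = a.2) := by
        rw [← hs]; exact (hperm.countP_eq _).symm
      rw [hR] at hwk
      rw [hs]
      unfold pvDecide
      cases rest with
      | nil =>
        have hk1 : r.2.2 = 1 := by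
          rw [hwk, hcnt]; simp
        have hwa : w = a := by
          refine countP_one_unique (p := fun q => decide (q.2 = a.2)) ?_ hwmem ?_ hamem ?_
          · rw [hcnt]; simp
          · simp [hw2, hR]
          · simp
        simp only [List.take, hk1, hw1, hwa, hR]
        norm_num
      | cons b t =>
        have hpw : (PySem.List.sorted items (fun p => p.2) true).Pairwise
            (fun x y => y.2 ≤ x.2) := PySem.List.sorted_pairwise_rev items (fun p => p.2)
        rw [hs] at hpw
        have hba : b.2 ≤ a.2 := (List.pairwise_cons.1 hpw).1 b (List.mem_cons_self ..)
        have hpw' := (List.pairwise_cons.1 hpw).2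
        have htb : ∀ y ∈ t, y.2 ≤ b.2 := (List.pairwise_cons.1 hpw').1
        by_cases hbe : b.2 = a.2
        · have hk2 : 2 ≤ r.2.2 := by
            rw [hwk, hcnt]
            simp [hbe]
            omega
          simp only [List.take, hbe, hk2]
          norm_num [hk2]
        · have hk1 : r.2.2 = 1 := by
            rw [hwk, hcnt]
            have ht0 : t.countP (fun q => q.2 = a.2) = 0 := by
              rw [List.countP_eq_zero]
              intro y hy
              have := htb y hy
              simp only [decide_eq_true_eq]
              omega
            simp [hbe, ht0]
          have hwa : w = a := by
            refine countP_one_unique (p := fun q => decide (q.2 = a.2)) ?_ hwmem ?_ hamem ?_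
            · rw [hcnt]; omega
            · simp [hw2, hR]
            · simp
          simp only [List.take, hk1, hw1, hwa, hR]
          norm_num [hbe]
    -- step 2: B equals pvDecide of the scan over the run pairs of the sorted list
    have hSsorted : S.Pairwise (· ≤ ·) := PySem.List.sorted_pairwise V (fun v => v)
    have hSperm : S.Perm V := PySem.List.sorted_perm V (fun v => v) false
    have hB : (if 2 ≤ (pvRunScan S ("", 0, 0)).2.2 then (("SPLIT", "TIE") : String × String)
        else ((pvRunScan S ("", 0, 0)).1,
          if (pvRunScan S ("", 0, 0)).2.1 == (S.length : Int) then "UNANIMOUS" else "MAJORITY"))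
        = pvDecide ((pvRunPairs S).foldl pvScanStep ("", 0, 0)) (V.length : Int) := by
      rw [runScan_eq_fold, pvDecide, hSperm.length_eq]
    -- step 3: the run pairs of S are a permutation of the counter items
    have hitems_nodup : items.Nodup := by
      rw [hitems, PySem.Dict.items_counter]
      refine List.Nodup.map ?_ (PySem.Set.nodup_ofList V)
      intro x y hxy
      simpa using congrArg Prod.fst hxy
    have hpermRI : (pvRunPairs S).Perm items := by
      refine (List.perm_ext_iff_of_nodup (runPairs_nodup S hSsorted) hitems_nodup).2 ?_
      intro p
      rw [runPairs_mem S hSsorted p, hitems, PySem.Dict.items_counter]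
      constructor
      · rintro ⟨hm, hc⟩
        refine List.mem_map.2 ⟨p.1, ?_, ?_⟩
        · exact (PySem.Set.mem_ofList ..).2 (hSperm.mem_iff.1 hm)
        · have : S.count p.1 = V.count p.1 := hSperm.count_eq p.1
          calc (p.1, (V.count p.1 : Int)) = (p.1, (S.count p.1 : Int)) := by rw [this]
            _ = (p.1, p.2) := by rw [← hc]
            _ = p := rfl
      · intro hm
        rcases List.mem_map.1 hm with ⟨k, hk, hkp⟩
        have hk1 : p.1 = k := (congrArg Prod.fst hkp).symm
        have hk2 : p.2 = (V.count k : Int) := (congrArg Prod.snd hkp).symm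
        refine ⟨?_, ?_⟩
        · rw [hk1]; exact hSperm.mem_iff.2 ((PySem.Set.mem_ofList ..).1 hk)
        · rw [hk1, hk2, hSperm.count_eq]
    rw [hA, hB]
    exact decide_perm items (pvRunPairs S) hpermRI.symm hpos (V.length : Int)

-- ===== VERDICT (by name: the statement is the Claim_ definition above) =====
theorem calculate_derived_label_spec : Claim_equal_calculate_derived_label := by
  intro votes _
  exact AB_eq votes
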